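-- pv_equiv track=rewrite | github.com/jelleromer/adventofcode2024 | python/day9.py | getFittingGapIndex
-- ===== SOURCE A (Python) =====
-- def countGap(fs: list[int | None], left: int):
--     i = 0
--     length = len(fs)
--     while fs[left + i] is None:
--         i += 1
--         # avoid oob index
--         if left + i >= length:
--             return i
--     return i
--
-- def getFittingGapIndex(fs, fileSize, r) -> int | None:
--     i = 0
--     gapSize = 0
--     while i < r:
--         while fs[i] is not None:
--             i += 1
--             if i >= r:
--                 return None
--         gapSize = countGap(fs, i)
--         if gapSize >= fileSize:
--             return i
--         i += gapSize
--     return None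
-- ===== SOURCE B (Python) =====
-- def getFittingGapIndex(fs, fileSize, r):
--     gapStart = None
--     for j in range(len(fs)):
--         if fs[j] is None:
--             if gapStart is None:
--                 gapStart = j
--             if gapStart < r and j - gapStart + 1 >= fileSize:
--                 return gapStart
--         else:
--             gapStart = None
--     return None
-- ===== Notes on version B (the rewrite author's own statement) =====
-- stated objective: simpler
-- what changed: Replaced A's nested while-loops (inner skip-filled scan, the countGap helper and i += gapSize jumps) by a single linear for-loop over the indices that tracks the current gap's start inline.
import Mathlib
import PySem

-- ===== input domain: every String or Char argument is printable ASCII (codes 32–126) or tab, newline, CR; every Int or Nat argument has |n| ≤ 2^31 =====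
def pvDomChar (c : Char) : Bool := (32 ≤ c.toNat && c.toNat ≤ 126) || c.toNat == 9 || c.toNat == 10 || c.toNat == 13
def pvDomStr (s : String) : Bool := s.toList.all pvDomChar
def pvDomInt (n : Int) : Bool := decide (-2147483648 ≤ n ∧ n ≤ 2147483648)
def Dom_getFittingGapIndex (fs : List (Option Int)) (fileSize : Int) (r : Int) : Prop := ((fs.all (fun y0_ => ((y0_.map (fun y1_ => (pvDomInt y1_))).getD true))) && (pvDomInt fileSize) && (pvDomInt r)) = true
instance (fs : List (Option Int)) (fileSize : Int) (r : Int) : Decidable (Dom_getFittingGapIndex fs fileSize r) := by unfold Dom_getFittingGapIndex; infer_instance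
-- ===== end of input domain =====

-- B replaces A's nested while-loops (skip-filled scan, countGap helper, i += gapSize jumps)
-- by one linear for-loop tracking the current gap's start inline (simpler decomposition; same O(n) cost).
-- Equality is about return values on Pre_; outside Pre_ the Python A raises IndexError (see Pre_'s comment).

-- ===== PORT A =====

-- countGap's while loop: i counts Nones from fs[left], with Python's oob guard after the increment.
-- pyGet? = none is Python's IndexError on the condition check; unreachable from getFittingGapIndex's calls.
def countGapAux (fs : List (Option Int)) (left : Int) (i : Int) : Int :=
  match PySem.List.pyGet? fs (left + i) with
  | some none =>
      if _h : (fs.length : Int) ≤ left + (i + 1) then i + 1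
      else countGapAux fs left (i + 1)
  | _ => i
termination_by ((fs.length : Int) - (left + i)).toNat
decreasing_by omega

def countGap (fs : List (Option Int)) (left : Int) : Int := countGapAux fs left 0

-- the inner "while fs[i] is not None" loop: some j = exited with fs[j] None; none = returned None.
-- pyGet? = none is Python's IndexError (unreachable under Pre_); the port returns none there.
def skipFilled (fs : List (Option Int)) (r : Int) (i : Int) : Option Int :=
  match PySem.List.pyGet? fs i with
  | none => none
  | some none => some i
  | some (some _) =>
      if _h : r ≤ i + 1 then none
      else skipFilled fs r (i + 1)
termination_by (r - i).toNat
decreasing_by omega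

-- termination helpers for the outer loop (cited by name in decreasing_by)
theorem skipFilled_some_facts (fs : List (Option Int)) (r i j : Int)
    (h : skipFilled fs r i = some j) :
    i ≤ j ∧ PySem.List.pyGet? fs j = some none ∧ (i < r → j < r) := by
  fun_induction skipFilled fs r i with
  | case1 => simp_all
  | case2 => simp_all
  | case3 => simp_all
  | case4 _ _ _ _ ih =>
    rcases ih h with ⟨h1, h2, h3⟩
    refine ⟨by omega, h2, fun _ => h3 (by omega)⟩

theorem countGapAux_ge (fs : List (Option Int)) (left i : Int) :
    i ≤ countGapAux fs left i := by
  fun_induction countGapAux fs left i with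
  | case1 => omega
  | case2 _ _ _ ih => omega
  | case3 => omega

theorem countGapAux_pos (fs : List (Option Int)) (left i : Int)
    (h : PySem.List.pyGet? fs (left + i) = some none) :
    i + 1 ≤ countGapAux fs left i := by
  fun_induction countGapAux fs left i with
  | case1 => omega
  | case2 i hm hge ih => have := countGapAux_ge fs left (i + 1); omega
  | case3 => simp_all

theorem countGap_pos (fs : List (Option Int)) (j : Int)
    (h : PySem.List.pyGet? fs j = some none) : 1 ≤ countGap fs j := by
  unfold countGap
  have := countGapAux_pos fs j 0 (by rwa [show j + (0 : Int) = j by omega])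
  omega

-- the outer "while i < r" loop
def gfgiGo (fs : List (Option Int)) (fileSize r i : Int) : Option Int :=
  if _hlt : i < r then
    match _hs : skipFilled fs r i with
    | none => none
    | some j =>
        let gapSize := countGap fs j
        if fileSize ≤ gapSize then some j
        else gfgiGo fs fileSize r (j + gapSize)
  else none
termination_by (r - i).toNat
decreasing_by
  have h1 := skipFilled_some_facts fs r i j _hs
  have h2 := countGap_pos fs j h1.2.1
  omega

def getFittingGapIndex (fs : List (Option Int)) (fileSize : Int) (r : Int) : Option Int :=
  gfgiGo fs fileSize r 0

-- ===== PORT B =====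

-- Source B's single for-loop over range(len(fs)), walking the list with index j and gapStart.
def altGo (fileSize r : Int) (rest : List (Option Int)) (j : Int) (gapStart : Option Int) : Option Int :=
  match rest with
  | [] => none
  | x :: tl =>
    match x with
    | none =>
        let g := gapStart.getD j
        if g < r ∧ fileSize ≤ j - g + 1 then some g
        else altGo fileSize r tl (j + 1) (some g)
    | some _ => altGo fileSize r tl (j + 1) none

def getFittingGapIndex_alt (fs : List (Option Int)) (fileSize : Int) (r : Int) : Option Int :=
  altGo fileSize r fs 0 none

-- ===== PRECONDITION & SPEC =====

-- length of the run of Nones starting at position g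
def runLen (fs : List (Option Int)) (g : Nat) : Nat :=
  ((fs.drop g).takeWhile (fun x => x.isNone)).length

-- Pre_ excludes exactly the inputs where Python A raises IndexError: r > len(fs) while no
-- run of at least fileSize consecutive Nones exists (then the scan walks past the end).
def Pre_getFittingGapIndex (fs : List (Option Int)) (fileSize : Int) (r : Int) : Prop :=
  r ≤ (fs.length : Int) ∨ ∃ g, g < fs.length ∧ fs[g]? = some none ∧ fileSize ≤ (runLen fs g : Int)
instance (fs : List (Option Int)) (fileSize : Int) (r : Int) : Decidable (Pre_getFittingGapIndex fs fileSize r) := by unfold Pre_getFittingGapIndex; infer_instance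

def pvWitness_getFittingGapIndex : List (Option Int) × Int × Int := ([none, some 1], 1, 2)

def Spec_getFittingGapIndex (fs : List (Option Int)) (fileSize : Int) (r : Int) (out : Option Int) : Prop := out = getFittingGapIndex_alt fs fileSize r
instance (fs : List (Option Int)) (fileSize : Int) (r : Int) (out : Option Int) : Decidable (Spec_getFittingGapIndex fs fileSize r out) := by unfold Spec_getFittingGapIndex; infer_instance

-- ===== CLAIM (what is proved, stated in full; the proofs are below) =====
def Claim_equal_getFittingGapIndex : Prop := ∀ (fs : List (Option Int)) (fileSize : Int) (r : Int), Dom_getFittingGapIndex fs fileSize r → Pre_getFittingGapIndex fs fileSize r → Spec_getFittingGapIndex fs fileSize r (getFittingGapIndex fs fileSize r)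

-- ===== LEMMAS AND PROOFS =====

-- definitional step lemmas for altGo
theorem altGo_cons_none (fileSize r j : Int) (gs : Option Int) (tl : List (Option Int)) :
    altGo fileSize r (none :: tl) j gs =
      if gs.getD j < r ∧ fileSize ≤ j - gs.getD j + 1 then some (gs.getD j)
      else altGo fileSize r tl (j + 1) (some (gs.getD j)) := rfl
theorem altGo_cons_some (fileSize r j : Int) (gs : Option Int) (v : Int) (tl : List (Option Int)) :
    altGo fileSize r ((some v) :: tl) j gs = altGo fileSize r tl (j + 1) none := rfl

-- B never returns once the index (and any recorded gap start) has reached r.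
theorem altGo_ge_r (fileSize r : Int) (rest : List (Option Int)) (j : Int) (gs : Option Int)
    (hj : r ≤ j) (hgs : gs = none ∨ ∃ g, gs = some g ∧ r ≤ g) :
    altGo fileSize r rest j gs = none := by
  induction rest generalizing j gs with
  | nil => rfl
  | cons x tl ih =>
    cases x with
    | none =>
      rw [altGo_cons_none]
      have hg : r ≤ gs.getD j := by
        rcases hgs with h | ⟨g, hg, hrg⟩
        · simp [h]; omega
        · simp [hg]; omega
      rw [if_neg (by omega)]
      exact ih (j + 1) _ (by omega) (Or.inr ⟨_, rfl, hg⟩)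
    | some v => rw [altGo_cons_some]; exact ih (j + 1) none (by omega) (Or.inl rfl)

-- starting fresh at j with gapStart none is the same as gapStart = some j
theorem altGo_none_some_self (fileSize r : Int) (rest : List (Option Int)) (j : Int) :
    altGo fileSize r rest j none = altGo fileSize r rest j (some j) := by
  cases rest with
  | nil => rfl
  | cons x tl => cases x <;> rfl

-- if the head of rest is not None, a stale gapStart is irrelevant
theorem altGo_reset (fileSize r : Int) (rest : List (Option Int)) (j g : Int)
    (h : ∀ hd, rest.head? = some hd → hd ≠ none) :
    altGo fileSize r rest j (some g) = altGo fileSize r rest j none := by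
  cases rest with
  | nil => rfl
  | cons x tl =>
    cases x with
    | none => exact absurd rfl (h none (by simp))
    | some v => rw [altGo_cons_some, altGo_cons_some]

-- B scanning a block of m Nones from position j with gap start g
theorem altGo_run (fileSize r : Int) (m : Nat) (rest : List (Option Int)) (j g : Int)
    (hg : g ≤ j) :
    altGo fileSize r (List.replicate m none ++ rest) j (some g) =
    if g < r ∧ fileSize ≤ j - g + m ∧ 1 ≤ m then some g
    else altGo fileSize r rest (j + m) (some g) := by
  induction m generalizing j with
  | zero => simp
  | succ m ih =>
    rw [List.replicate_succ, List.cons_append, altGo_cons_none]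
    simp only [Option.getD_some]
    by_cases hc : g < r ∧ fileSize ≤ j - g + 1
    · rw [if_pos hc, if_pos ⟨hc.1, by push_cast; omega, by omega⟩]
    · rw [if_neg hc, ih (j + 1) (by omega)]
      by_cases hm : 1 ≤ m
      · have hiff : (g < r ∧ fileSize ≤ j + 1 - g + (m : Int) ∧ 1 ≤ m) ↔ (g < r ∧ fileSize ≤ j - g + ((m + 1 : Nat) : Int) ∧ 1 ≤ m + 1) := by
          constructor
          · rintro ⟨a, b, c⟩; exact ⟨a, by push_cast at *; omega, by omega⟩
          · rintro ⟨a, b, c⟩; exact ⟨a, by push_cast at *; omega, hm⟩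
        rw [if_congr hiff rfl rfl, show j + 1 + (m : Int) = j + ((m + 1 : Nat) : Int) by push_cast; ring]
      · have hm0 : m = 0 := by omega
        subst hm0
        rw [if_neg (by simp), if_neg (by push_cast; omega),
          show j + 1 + ((0 : Nat) : Int) = j + ((0 + 1 : Nat) : Int) by push_cast; ring]

-- ===== A-side characterizations =====

-- one-step equations for the A-side loops
theorem countGapAux_step_oob (fs : List (Option Int)) (left i : Int)
    (h : PySem.List.pyGet? fs (left + i) = none) : countGapAux fs left i = i := by
  rw [countGapAux]; split <;> simp_all

theorem countGapAux_step_some (fs : List (Option Int)) (left i v : Int)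
    (h : PySem.List.pyGet? fs (left + i) = some (some v)) : countGapAux fs left i = i := by
  rw [countGapAux]; split <;> simp_all

theorem countGapAux_step_none (fs : List (Option Int)) (left i : Int)
    (h : PySem.List.pyGet? fs (left + i) = some none) :
    countGapAux fs left i =
      if (fs.length : Int) ≤ left + (i + 1) then i + 1 else countGapAux fs left (i + 1) := by
  rw [countGapAux]; split <;> simp_all

theorem skipFilled_step_oob (fs : List (Option Int)) (r i : Int)
    (h : PySem.List.pyGet? fs i = none) : skipFilled fs r i = none := by
  rw [skipFilled]; split <;> simp_all

theorem skipFilled_step_none (fs : List (Option Int)) (r i : Int)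
    (h : PySem.List.pyGet? fs i = some none) : skipFilled fs r i = some i := by
  rw [skipFilled]; split <;> simp_all

theorem skipFilled_step_some (fs : List (Option Int)) (r i v : Int)
    (h : PySem.List.pyGet? fs i = some (some v)) :
    skipFilled fs r i = if r ≤ i + 1 then none else skipFilled fs r (i + 1) := by
  rw [skipFilled]; split <;> simp_all

theorem gfgiGo_step_not_lt (fs : List (Option Int)) (fileSize r i : Int)
    (h : ¬ i < r) : gfgiGo fs fileSize r i = none := by
  rw [gfgiGo]; simp [h]

theorem gfgiGo_step_skip_none (fs : List (Option Int)) (fileSize r i : Int)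
    (h1 : i < r) (h2 : skipFilled fs r i = none) : gfgiGo fs fileSize r i = none := by
  rw [gfgiGo, dif_pos h1]; split <;> simp_all

theorem gfgiGo_step_skip_some (fs : List (Option Int)) (fileSize r i j : Int)
    (h1 : i < r) (h2 : skipFilled fs r i = some j) :
    gfgiGo fs fileSize r i =
      if fileSize ≤ countGap fs j then some j
      else gfgiGo fs fileSize r (j + countGap fs j) := by
  rw [gfgiGo, dif_pos h1]; split <;> simp_all

-- countGapAux computes the takeWhile run length (fuel = distance to the end of the list)
theorem countGapAux_oob_case (fs : List (Option Int)) (left i : Nat)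
    (hge : fs.length ≤ left + i) :
    countGapAux fs (left : Int) (i : Int) =
      (i : Int) + (((fs.drop (left + i)).takeWhile (fun x => x.isNone)).length : Int) := by
  have hx : PySem.List.pyGet? fs ((left : Int) + (i : Int)) = none := by
    rw [show (left : Int) + (i : Int) = ((left + i : Nat) : Int) by push_cast; ring,
      PySem.List.pyGet?_natCast]
    exact List.getElem?_eq_none hge
  rw [countGapAux_step_oob fs _ _ hx, List.drop_eq_nil_iff.mpr hge]
  simp

-- countGapAux computes the takeWhile run length (fuel = distance to the end of the list)
theorem countGapAux_eq_fuel (fs : List (Option Int)) (d : Nat) :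
    ∀ left i : Nat, fs.length ≤ left + i + d →
    countGapAux fs (left : Int) (i : Int) =
      (i : Int) + (((fs.drop (left + i)).takeWhile (fun x => x.isNone)).length : Int) := by
  induction d with
  | zero =>
    intro left i hle
    exact countGapAux_oob_case fs left i (by omega)
  | succ d ih =>
    intro left i hle
    rcases Nat.lt_or_ge (left + i) fs.length with hlt | hge
    · have hx : PySem.List.pyGet? fs ((left : Int) + (i : Int)) = some fs[left + i] := by
        rw [show (left : Int) + (i : Int) = ((left + i : Nat) : Int) by push_cast; ring,
          PySem.List.pyGet?_natCast]
        exact List.getElem?_eq_getElem hlt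
      have hdrop : fs.drop (left + i) = fs[left + i] :: fs.drop (left + i + 1) :=
        List.drop_eq_getElem_cons hlt
      cases hv : fs[left + i] with
      | some v =>
        rw [countGapAux_step_some fs _ _ v (by rw [hx, hv]), hdrop, hv]
        simp
      | none =>
        rw [countGapAux_step_none fs _ _ (by rw [hx, hv])]
        have hrec : fs.drop (left + (i + 1)) = fs.drop (left + i + 1) := by
          rw [show left + (i + 1) = left + i + 1 from by omega]
        split_ifs with hoob
        · -- next index out of bounds: the run ends at the end of the list
          have hnil : fs.drop (left + i + 1) = [] := List.drop_eq_nil_iff.mpr (by omega)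
          rw [hdrop, hv, hnil]
          simp
        · have hih := ih left (i + 1) (by omega)
          rw [show ((i + 1 : Nat) : Int) = (i : Int) + 1 by push_cast; ring, hrec] at hih
          rw [hih, hdrop, hv]
          simp
          ring
    · exact countGapAux_oob_case fs left i hge

theorem countGap_eq_runLen (fs : List (Option Int)) (jn : Nat) :
    countGap fs (jn : Int) = (runLen fs jn : Int) := by
  unfold countGap runLen
  have := countGapAux_eq_fuel fs fs.length jn 0 (by omega)
  simpa using this

theorem skipFilled_none_alt (fs : List (Option Int)) (fileSize r : Int) (d : Nat) :
    ∀ i : Nat, fs.length ≤ i + d → skipFilled fs r (i : Int) = none →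
    altGo fileSize r (fs.drop i) (i : Int) none = none := by
  induction d with
  | zero =>
    intro i hle _
    rw [List.drop_eq_nil_iff.mpr (by omega)]
    rfl
  | succ d ih =>
    intro i hle h
    rcases Nat.lt_or_ge i fs.length with hlt | hge
    · have hx : PySem.List.pyGet? fs (i : Int) = some fs[i] := by
        rw [PySem.List.pyGet?_natCast]; exact List.getElem?_eq_getElem hlt
      have hdrop : fs.drop i = fs[i] :: fs.drop (i + 1) := List.drop_eq_getElem_cons hlt
      cases hv : fs[i] with
      | none =>
        rw [skipFilled_step_none fs r _ (by rw [hx, hv])] at h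
        simp at h
      | some v =>
        rw [skipFilled_step_some fs r _ v (by rw [hx, hv])] at h
        rw [hdrop, hv, altGo_cons_some]
        split_ifs at h with hr
        · exact altGo_ge_r fileSize r _ _ none (by omega) (Or.inl rfl)
        · have := ih (i + 1) (by omega) (by rw [show ((i + 1 : Nat) : Int) = (i : Int) + 1 by push_cast; ring]; exact h)
          rw [show ((i + 1 : Nat) : Int) = (i : Int) + 1 by push_cast; ring] at this
          exact this
    · rw [List.drop_eq_nil_iff.mpr hge]
      rfl

theorem skipFilled_some_nat (fs : List (Option Int)) (fileSize r : Int) (d : Nat) :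
    ∀ (i : Nat) (j : Int), fs.length ≤ i + d → skipFilled fs r (i : Int) = some j →
    ∃ jn : Nat, j = (jn : Int) ∧ i ≤ jn ∧ jn < fs.length ∧ fs[jn]? = some none ∧
      altGo fileSize r (fs.drop i) (i : Int) none = altGo fileSize r (fs.drop jn) (jn : Int) none := by
  induction d with
  | zero =>
    intro i j hle h
    have hx : PySem.List.pyGet? fs (i : Int) = none := by
      rw [PySem.List.pyGet?_natCast]; exact List.getElem?_eq_none (by omega)
    rw [skipFilled_step_oob fs r _ hx] at h
    simp at h
  | succ d ih =>
    intro i j hle h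
    rcases Nat.lt_or_ge i fs.length with hlt | hge
    · have hx : PySem.List.pyGet? fs (i : Int) = some fs[i] := by
        rw [PySem.List.pyGet?_natCast]; exact List.getElem?_eq_getElem hlt
      cases hv : fs[i] with
      | none =>
        rw [skipFilled_step_none fs r _ (by rw [hx, hv])] at h
        refine ⟨i, by exact (Option.some_inj.mp h).symm, le_refl i, hlt, ?_, rfl⟩
        rw [List.getElem?_eq_getElem hlt, hv]
      | some v =>
        rw [skipFilled_step_some fs r _ v (by rw [hx, hv])] at h
        split_ifs at h with hr
        rw [show (i : Int) + 1 = ((i + 1 : Nat) : Int) by push_cast; ring] at h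
        rcases ih (i + 1) j (by omega) h with ⟨jn, h1, h2, h3, h4, h5⟩
        refine ⟨jn, h1, by omega, h3, h4, ?_⟩
        have hdrop : fs.drop i = fs[i] :: fs.drop (i + 1) := List.drop_eq_getElem_cons hlt
        rw [hdrop, hv, altGo_cons_some,
          show (i : Int) + 1 = ((i + 1 : Nat) : Int) by push_cast; ring, h5]
    · have hx : PySem.List.pyGet? fs (i : Int) = none := by
        rw [PySem.List.pyGet?_natCast]; exact List.getElem?_eq_none hge
      rw [skipFilled_step_oob fs r _ hx] at h
      simp at h

-- decomposition of the suffix at a run start into the run and the tail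
theorem run_decomp (fs : List (Option Int)) (jn : Nat) :
    fs.drop jn = List.replicate (runLen fs jn) none ++ (fs.drop jn).dropWhile (fun x => x.isNone) := by
  conv_lhs => rw [← List.takeWhile_append_dropWhile (p := fun x : Option Int => x.isNone) (l := fs.drop jn)]
  congr 1
  rw [List.eq_replicate_iff]
  refine ⟨rfl, ?_⟩
  intro b hb
  have := List.mem_takeWhile_imp hb
  simpa [Option.isNone_iff_eq_none] using this

theorem run_tail (fs : List (Option Int)) (jn : Nat) :
    (fs.drop jn).dropWhile (fun x => x.isNone) = fs.drop (jn + runLen fs jn) := by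
  have h := run_decomp fs jn
  have h1 := List.drop_left (l₁ := List.replicate (runLen fs jn) (none : Option Int))
    (l₂ := (fs.drop jn).dropWhile (fun x => x.isNone))
  rw [List.length_replicate] at h1
  calc (fs.drop jn).dropWhile (fun x => x.isNone)
      = ((List.replicate (runLen fs jn) (none : Option Int)) ++
          (fs.drop jn).dropWhile (fun x => x.isNone)).drop (runLen fs jn) := h1.symm
    _ = (fs.drop jn).drop (runLen fs jn) := by rw [← h]
    _ = fs.drop (jn + runLen fs jn) := List.drop_drop ..

-- ===== main induction =====

theorem gfgiGo_eq_altGo (fs : List (Option Int)) (fileSize r : Int) (d : Nat) :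
    ∀ i : Nat, (r - i).toNat ≤ d →
    gfgiGo fs fileSize r (i : Int) = altGo fileSize r (fs.drop i) (i : Int) none := by
  induction d with
  | zero =>
    intro i hd
    have hnlt : ¬ (i : Int) < r := by omega
    rw [gfgiGo_step_not_lt fs fileSize r _ hnlt]
    exact (altGo_ge_r fileSize r _ _ none (by omega) (Or.inl rfl)).symm
  | succ d ih =>
    intro i hd
    by_cases hlt : (i : Int) < r
    · cases hs : skipFilled fs r (i : Int) with
      | none =>
        rw [gfgiGo_step_skip_none fs fileSize r _ hlt hs]
        exact (skipFilled_none_alt fs fileSize r fs.length i (by omega) hs).symm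
      | some j =>
        rcases skipFilled_some_nat fs fileSize r fs.length i j (by omega) hs with
          ⟨jn, hj, hij, hjlt, hjn, halt⟩
        have hjr : (jn : Int) < r := by
          have := (skipFilled_some_facts fs r (i : Int) j hs).2.2 hlt
          omega
        subst hj
        rw [gfgiGo_step_skip_some fs fileSize r _ _ hlt hs, countGap_eq_runLen fs jn]
        set L := runLen fs jn with hL
        have hv0 : fs[jn] = none := by
          have h1 := List.getElem?_eq_getElem hjlt
          rw [h1] at hjn
          exact Option.some_inj.mp hjn
        have hL1 : 1 ≤ L := by
          have hdrop : fs.drop jn = (none : Option Int) :: fs.drop (jn + 1) := by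
            rw [List.drop_eq_getElem_cons hjlt, hv0]
          rw [hL]
          unfold runLen
          rw [hdrop]
          simp
        -- B side: walk the run of L Nones starting at jn
        have hBrun : altGo fileSize r (fs.drop jn) (jn : Int) none =
            if (jn : Int) < r ∧ fileSize ≤ (jn : Int) - (jn : Int) + L ∧ 1 ≤ L then some (jn : Int)
            else altGo fileSize r (fs.drop (jn + L)) ((jn : Int) + L) (some (jn : Int)) := by
          rw [altGo_none_some_self]
          conv_lhs => rw [run_decomp fs jn]
          rw [run_tail fs jn, ← hL]
          exact altGo_run fileSize r L (fs.drop (jn + L)) (jn : Int) (jn : Int) (le_refl _)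
        rw [halt, hBrun]
        by_cases hf : fileSize ≤ (L : Int)
        · rw [if_pos hf, if_pos ⟨hjr, by omega, hL1⟩]
        · rw [if_neg hf, if_neg (by rintro ⟨-, hmid, -⟩; omega)]
          have hreset : altGo fileSize r (fs.drop (jn + L)) ((jn : Int) + L) (some (jn : Int)) =
              altGo fileSize r (fs.drop (jn + L)) ((jn : Int) + L) none := by
            apply altGo_reset
            intro hd' hhd
            rw [← run_tail fs jn] at hhd
            have hns := List.head?_dropWhile_not (fun x : Option Int => x.isNone) (fs.drop jn)
            rw [hhd] at hns
            simp at hns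
            exact Option.ne_none_iff_isSome.mpr hns
          have hrec := ih (jn + L) (by omega)
          rw [hreset, show (jn : Int) + (L : Int) = ((jn + L : Nat) : Int) by push_cast; ring, hrec]
    · rw [gfgiGo_step_not_lt fs fileSize r _ hlt]
      exact (altGo_ge_r fileSize r _ _ none (by omega) (Or.inl rfl)).symm

-- ===== VERDICT (by name: the statement is the Claim_ definition above) =====
theorem getFittingGapIndex_spec : Claim_equal_getFittingGapIndex := by
  intro fs fileSize r _ _
  unfold Spec_getFittingGapIndex getFittingGapIndex getFittingGapIndex_alt
  have := gfgiGo_eq_altGo fs fileSize r r.toNat 0 (by omega)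
  simpa using this
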